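-- pv_equiv track=rewrite | github.com/Zombiesama18/Leetcode_Python | Leetcode/6084. 最多单词数的发件人.py | largestWordCount
-- ===== SOURCE A (Python) =====
-- import collections
-- from typing import List
--
-- def largestWordCount(messages: List[str], senders: List[str]) -> str:
--     dictionary = collections.defaultdict(int)
--     for sender, message in zip(senders, messages):
--         dictionary[sender] += len(message.split())
--     maxCounter = 0
--     result = ''
--     for k, v in dictionary.items():
--         if v == maxCounter:
--             result = max(result, k)
--         elif v > maxCounter:
--             maxCounter = v
--             result = k
--     return result
-- ===== SOURCE B (Python) =====
-- def largestWordCount(messages, senders):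
--     counts = {}
--     for sender, message in zip(senders, messages):
--         counts[sender] = counts.get(sender, 0) + len(message.split())
--     items = sorted(counts.items(), key=lambda kv: (kv[1], kv[0]))
--     return items[-1][0] if items else ''
-- ===== Notes on version B (the rewrite author's own statement) =====
-- stated objective: alternative
-- what changed: The manual running-max loop with a (maxCounter, result) accumulator and an explicit tie branch is replaced by sorting the dict items by (count, sender) and taking the last item's sender, with an empty guard.
import Mathlib
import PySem

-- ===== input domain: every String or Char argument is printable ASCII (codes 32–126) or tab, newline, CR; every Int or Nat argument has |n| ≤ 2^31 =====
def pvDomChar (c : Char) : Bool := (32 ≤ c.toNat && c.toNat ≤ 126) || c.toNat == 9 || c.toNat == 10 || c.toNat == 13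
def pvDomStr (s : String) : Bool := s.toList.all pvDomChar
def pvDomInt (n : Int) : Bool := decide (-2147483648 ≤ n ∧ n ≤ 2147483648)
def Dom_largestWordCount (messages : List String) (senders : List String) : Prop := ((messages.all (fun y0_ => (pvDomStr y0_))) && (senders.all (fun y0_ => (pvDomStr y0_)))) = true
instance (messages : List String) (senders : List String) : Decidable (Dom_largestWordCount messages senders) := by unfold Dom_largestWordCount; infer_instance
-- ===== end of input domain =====

-- B replaces A's manual running-max scan (tie branch + sentinel accumulator) by
-- sorting the sender→word-count items by (count, sender) and taking the last one.


-- ===== PORT A =====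
def largestWordCount (messages : List String) (senders : List String) : String :=
  let dictionary := (senders.zip messages).foldl
    (fun d (p : String × String) =>
      d.modify p.1 0 (fun c => c + ((PySem.Str.split₀ p.2).length : Int)))
    PySem.Dict.empty
  let final := dictionary.items.foldl
    (fun (st : Int × String) (kv : String × Int) =>
      if kv.2 = st.1 then (st.1, max st.2 kv.1)
      else if kv.2 > st.1 then (kv.2, kv.1)
      else st)
    ((0 : Int), "")
  final.2

-- ===== PORT B =====
def largestWordCount_alt (messages : List String) (senders : List String) : String :=
  let counts := (senders.zip messages).foldl
    (fun d (p : String × String) =>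
      d.insert p.1 (d.getD p.1 0 + ((PySem.Str.split₀ p.2).length : Int)))
    PySem.Dict.empty
  let items := PySem.List.sorted counts.items (fun kv => toLex (kv.2, kv.1))
  match PySem.List.pyGet? items (-1) with
  | some kv => kv.1
  | none => ""

-- ===== PRECONDITION & SPEC =====
def Spec_largestWordCount (messages : List String) (senders : List String) (out : String) : Prop := out = largestWordCount_alt messages senders
instance (messages : List String) (senders : List String) (out : String) : Decidable (Spec_largestWordCount messages senders out) := by unfold Spec_largestWordCount; infer_instance

-- ===== CLAIM (what is proved, stated in full; the proofs are below) =====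
def Claim_equal_largestWordCount : Prop := ∀ (messages : List String) (senders : List String), Dom_largestWordCount messages senders → Spec_largestWordCount messages senders (largestWordCount messages senders)

-- ===== LEMMAS AND PROOFS =====

theorem pv_empty_le (s : String) : "" ≤ s := le_of_not_gt (by
  intro h
  rw [String.lt_iff_toList_lt] at h
  exact (List.not_lt_nil _) h)

-- A's loop body is the running lexicographic max on (count, name).
theorem pv_step_eq (st : Int × String) (kv : String × Int) :
    (if kv.2 = st.1 then (st.1, max st.2 kv.1)
     else if kv.2 > st.1 then (kv.2, kv.1)
     else st)
    = if toLex st < toLex (kv.2, kv.1) then (kv.2, kv.1) else st := by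
  rcases st with ⟨m, r⟩
  rcases kv with ⟨k, v⟩
  simp only [Prod.Lex.lt_iff, ofLex_toLex]
  by_cases h1 : v = m
  · subst h1
    rw [if_pos rfl]
    rcases le_or_gt k r with hk | hk
    · rw [max_eq_left hk, if_neg]
      rintro (h | ⟨-, h⟩)
      · exact lt_irrefl _ h
      · exact absurd h (not_lt.mpr hk)
    · rw [max_eq_right (le_of_lt hk), if_pos (Or.inr ⟨rfl, hk⟩)]
  · by_cases h2 : v > m
    · rw [if_neg h1, if_pos h2, if_pos (Or.inl h2)]
    · rw [if_neg h1, if_neg h2, if_neg]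
      rintro (h | ⟨h, -⟩)
      · exact h2 h
      · exact h1 h.symm

-- The running-max fold: its result is the start or a (swapped) element, and dominates all.
theorem pv_foldl_max_spec (l : List (String × Int)) (s : Int × String) :
    ((l.foldl (fun st kv => if toLex st < toLex (kv.2, kv.1) then (kv.2, kv.1) else st) s) = s
      ∨ ∃ kv ∈ l, (l.foldl (fun st kv => if toLex st < toLex (kv.2, kv.1) then (kv.2, kv.1) else st) s) = (kv.2, kv.1))
    ∧ toLex s ≤ toLex (l.foldl (fun st kv => if toLex st < toLex (kv.2, kv.1) then (kv.2, kv.1) else st) s)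
    ∧ ∀ kv ∈ l, toLex (kv.2, kv.1) ≤ toLex (l.foldl (fun st kv => if toLex st < toLex (kv.2, kv.1) then (kv.2, kv.1) else st) s) := by
  induction l generalizing s with
  | nil => exact ⟨Or.inl rfl, le_refl _, by simp⟩
  | cons a t ih =>
    simp only [List.foldl_cons]
    set s' := if toLex s < toLex (a.2, a.1) then (a.2, a.1) else s with hs'
    obtain ⟨hmem, hle, hall⟩ := ih s'
    refine ⟨?_, ?_, ?_⟩
    · rcases hmem with h | ⟨kv, hkv, h⟩
      · rw [h, hs']
        split
        · exact Or.inr ⟨a, List.mem_cons_self, rfl⟩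
        · exact Or.inl rfl
      · exact Or.inr ⟨kv, List.mem_cons_of_mem _ hkv, h⟩
    · refine le_trans ?_ hle
      rw [hs']; split
      · exact le_of_lt ‹_›
      · exact le_refl _
    · intro kv hkv
      rcases List.mem_cons.mp hkv with h | h
      · subst h
        refine le_trans ?_ hle
        rw [hs']; split
        · exact le_refl _
        · exact le_of_not_gt ‹_›
      · exact hall kv h

-- In a list pairwise-ordered by key, the last element's key dominates all.
theorem pv_pairwise_getLast {α κ : Type} [Preorder κ] (key : α → κ) (l : List α)
    (h : l.Pairwise (fun a b => key a ≤ key b)) :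
    ∀ (hne : l ≠ []) (x : α), x ∈ l → key x ≤ key (l.getLast hne) := by
  induction h with
  | nil => intro hne; exact absurd rfl hne
  | @cons a t ha hp ih =>
    intro hne x hx
    by_cases ht0 : t = []
    · subst ht0
      simp at hx
      subst hx
      simp
    · rw [List.getLast_cons ht0]
      rcases List.mem_cons.mp hx with h' | h'
      · subst h'
        exact ha _ (List.getLast_mem ht0)
      · exact ih ht0 x h'

-- The counting dict has nonnegative values throughout the fold.
theorem pv_getD_nonneg (L : List (String × String)) (d : PySem.Dict String Int)
    (h : ∀ k, 0 ≤ d.getD k 0) :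
    ∀ k, 0 ≤ (L.foldl (fun d p =>
        d.modify p.1 0 (fun c => c + ((PySem.Str.split₀ p.2).length : Int))) d).getD k 0 := by
  induction L generalizing d with
  | nil => exact h
  | cons p t ih =>
    simp only [List.foldl_cons]
    refine ih _ (fun k => ?_)
    by_cases hk : k = p.1
    · rw [hk, PySem.Dict.getD_modify_self]
      exact add_nonneg (h p.1) (Int.natCast_nonneg _)
    · rw [PySem.Dict.getD_modify_of_ne _ _ _ hk]
      exact h k

-- ===== VERDICT (by name: the statement is the Claim_ definition above) =====
theorem largestWordCount_spec : Claim_equal_largestWordCount := by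
  intro messages senders _
  unfold Spec_largestWordCount largestWordCount largestWordCount_alt
  simp only []
  -- the two dict-building folds are the same function (modify k 0 f = insert k (f (getD k 0)))
  have hfold : ((senders.zip messages).foldl
      (fun (d : PySem.Dict String Int) (p : String × String) =>
        d.insert p.1 (d.getD p.1 0 + ((PySem.Str.split₀ p.2).length : Int)))
      PySem.Dict.empty)
      = ((senders.zip messages).foldl
      (fun (d : PySem.Dict String Int) (p : String × String) =>
        d.modify p.1 0 (fun c => c + ((PySem.Str.split₀ p.2).length : Int)))
      PySem.Dict.empty) := rfl
  rw [hfold]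
  set d := (senders.zip messages).foldl
      (fun (d : PySem.Dict String Int) (p : String × String) =>
        d.modify p.1 0 (fun c => c + ((PySem.Str.split₀ p.2).length : Int)))
      PySem.Dict.empty with hd
  set l := d.items with hl
  -- facts about the dict
  have hnd : d.keys.Nodup := by
    rw [hd]
    exact PySem.Dict.nodup_keys_foldl_modify_key (senders.zip messages) Prod.fst 0
      (fun _ p c => c + ((PySem.Str.split₀ p.2).length : Int)) PySem.Dict.empty
      (by simp)
  have hpos : ∀ kv ∈ l, (0 : Int) ≤ kv.2 := by
    intro kv hkv
    have h1 : d.getD kv.1 0 = kv.2 :=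
      PySem.Dict.getD_of_mem_items d (by rcases kv with ⟨k, v⟩; exact hkv) hnd 0
    rw [← h1, hd]
    exact pv_getD_nonneg _ _ (by simp [PySem.Dict.getD_empty]) kv.1
  -- rewrite A's loop body to the lexicographic running max
  have hbody : (fun (st : Int × String) (kv : String × Int) =>
      if kv.2 = st.1 then (st.1, max st.2 kv.1)
      else if kv.2 > st.1 then (kv.2, kv.1)
      else st)
      = (fun st kv => if toLex st < toLex (kv.2, kv.1) then (kv.2, kv.1) else st) := by
    funext st kv; exact pv_step_eq st kv
  rw [hbody]
  obtain ⟨hmem, hinit, hdom⟩ := pv_foldl_max_spec l ((0 : Int), "")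
  set m := l.foldl (fun st kv => if toLex st < toLex (kv.2, kv.1) then (kv.2, kv.1) else st)
      ((0 : Int), "") with hm
  -- B's side
  by_cases hnil : l = []
  · rw [hnil] at hm ⊢
    simp [hm, PySem.List.sorted, PySem.List.pyGet?]
  · have hsne : PySem.List.sorted l (fun kv => toLex (kv.2, kv.1)) ≠ [] := by
      intro h; exact hnil ((PySem.List.sorted_eq_nil_iff _ _ _).mp h)
    set s := PySem.List.sorted l (fun kv => toLex (kv.2, kv.1)) with hs
    set g := s.getLast hsne with hg
    have hlast : PySem.List.pyGet? s (-1) = some g := by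
      rw [PySem.List.pyGet?_neg_one, hg]
      exact List.getLast?_eq_some_getLast hsne
    rw [hlast]
    -- g dominates every element of l in key order, and g ∈ l
    have hpair := PySem.List.sorted_pairwise l (fun kv => toLex (kv.2, kv.1))
    have hgl : ∀ x ∈ l, toLex (x.2, x.1) ≤ toLex (g.2, g.1) := by
      intro x hx
      exact pv_pairwise_getLast (fun kv => toLex (kv.2, kv.1)) s hpair hsne x
        ((PySem.List.mem_sorted _ _ _ _).mpr hx)
    have hgmem : g ∈ l := (PySem.List.mem_sorted _ _ _ _).mp (hg ▸ List.getLast_mem hsne)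
    -- m and (g.2, g.1) dominate each other
    have h1 : toLex (g.2, g.1) ≤ toLex m := hdom g hgmem
    have h2 : toLex m ≤ toLex (g.2, g.1) := by
      rcases hmem with h | ⟨kv, hkv, h⟩
      · rw [h]
        rw [Prod.Lex.le_iff]
        rcases lt_or_eq_of_le (hpos g hgmem) with h' | h'
        · exact Or.inl h'
        · exact Or.inr ⟨h', pv_empty_le _⟩
      · rw [h]; exact hgl kv hkv
    have : m = (g.2, g.1) := toLex.injective (le_antisymm h2 h1)
    rw [this]
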